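-- pv_equiv track=rewrite | github.com/KirbysGit/taylor.io | backend/generator/shared/tagline.py | _merge_bold_italic_runs
-- ===== SOURCE A (Python) =====
-- from typing import List, Tuple
--
-- def _merge_bold_italic_runs(runs: List[Tuple[str, bool, bool]]) -> List[Tuple[str, bool, bool]]:
--     merged: List[Tuple[str, bool, bool]] = []
--     for text_p, b, it in runs:
--         if not text_p:
--             continue
--         if merged and merged[-1][1] == b and merged[-1][2] == it:
--             merged[-1] = (merged[-1][0] + text_p, b, it)
--         else:
--             merged.append((text_p, b, it))
--     return merged
-- ===== SOURCE B (Python) =====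
-- from typing import List, Tuple
--
--
-- def _dc(rs: List[Tuple[str, bool, bool]]) -> List[Tuple[str, bool, bool]]:
--     """Divide and conquer: merge each half recursively, then join at the boundary."""
--     if len(rs) <= 1:
--         return list(rs)
--     mid = len(rs) // 2
--     left = _dc(rs[:mid])
--     right = _dc(rs[mid:])
--     if left[-1][1] == right[0][1] and left[-1][2] == right[0][2]:
--         return left[:-1] + [(left[-1][0] + right[0][0], right[0][1], right[0][2])] + right[1:]
--     return left + right
--
--
-- def _merge_bold_italic_runs(runs: List[Tuple[str, bool, bool]]) -> List[Tuple[str, bool, bool]]: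
--     return _dc([r for r in runs if r[0]])
-- ===== Notes on version B (the rewrite author's own statement) =====
-- stated objective: alternative
-- what changed: A's single left-to-right pass mutating the last accumulator entry is replaced by divide and conquer: drop empty-text runs, recursively merge each half, and combine the two results by joining the boundary runs when their flags match (correct because merging maximal equal-flag groups is associative).
import Mathlib
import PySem

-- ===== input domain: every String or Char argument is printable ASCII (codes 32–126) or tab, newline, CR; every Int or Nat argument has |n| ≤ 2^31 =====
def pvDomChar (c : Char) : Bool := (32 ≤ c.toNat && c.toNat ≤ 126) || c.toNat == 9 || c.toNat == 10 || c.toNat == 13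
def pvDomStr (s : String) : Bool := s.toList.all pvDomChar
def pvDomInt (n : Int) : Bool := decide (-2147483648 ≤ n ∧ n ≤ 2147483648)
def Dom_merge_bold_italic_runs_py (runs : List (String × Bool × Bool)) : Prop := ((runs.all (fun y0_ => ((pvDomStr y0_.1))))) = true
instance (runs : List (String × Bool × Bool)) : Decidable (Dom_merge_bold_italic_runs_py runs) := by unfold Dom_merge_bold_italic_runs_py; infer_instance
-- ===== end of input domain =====

-- B replaces A's single left-to-right pass (mutating the last accumulator entry) by divide and
-- conquer: filter out empty-text runs, recursively merge each half, join the halves at the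
-- boundary when flags match. Same result, different recursion structure. Return value only.

-- ===== PORT A =====
-- one iteration of A's for-loop over the accumulator `merged`
def pvMergeStepA (merged : List (String × Bool × Bool)) (r : String × Bool × Bool) :
    List (String × Bool × Bool) :=
  let (t, b, it) := r
  if t = "" then merged
  else
    match merged.getLast? with
    | some last =>
        if last.2.1 = b ∧ last.2.2 = it then
          merged.dropLast ++ [(last.1 ++ t, b, it)]
        else merged ++ [(t, b, it)]
    | none => merged ++ [(t, b, it)]

def merge_bold_italic_runs_py (runs : List (String × Bool × Bool)) : List (String × Bool × Bool) :=
  runs.foldl pvMergeStepA []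

-- ===== PORT B =====
-- the boundary join `left[:-1] + [(left[-1][0]+right[0][0], …)] + right[1:]` / `left + right`;
-- `left`/`right` are always nonempty where Source B calls this, so the `_, _` arm is unreachable there
def pvCombine (L R : List (String × Bool × Bool)) : List (String × Bool × Bool) :=
  match L.getLast?, R.head? with
  | some l, some r =>
      if l.2.1 = r.2.1 ∧ l.2.2 = r.2.2 then
        L.dropLast ++ (l.1 ++ r.1, r.2.1, r.2.2) :: R.tail
      else L ++ R
  | _, _ => L ++ R

-- Source B's _dc; the slices rs[:mid] / rs[mid:] with 0 ≤ mid ≤ len are List.take / List.drop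
def pvDC (rs : List (String × Bool × Bool)) : List (String × Bool × Bool) :=
  if _h : rs.length ≤ 1 then rs
  else
    let mid := rs.length / 2
    pvCombine (pvDC (rs.take mid)) (pvDC (rs.drop mid))
  termination_by rs.length
  decreasing_by
    · simp only [List.length_take]; omega
    · simp only [List.length_drop]; omega

def merge_bold_italic_runs_py_alt (runs : List (String × Bool × Bool)) :
    List (String × Bool × Bool) :=
  pvDC (runs.filter (fun r => !(r.1 == "")))

-- ===== PRECONDITION & SPEC =====
def Spec_merge_bold_italic_runs_py (runs : List (String × Bool × Bool)) (out : List (String × Bool × Bool)) : Prop := out = merge_bold_italic_runs_py_alt runs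
instance (runs : List (String × Bool × Bool)) (out : List (String × Bool × Bool)) : Decidable (Spec_merge_bold_italic_runs_py runs out) := by unfold Spec_merge_bold_italic_runs_py; infer_instance

-- ===== CLAIM (what is proved, stated in full; the proofs are below) =====
def Claim_equal_merge_bold_italic_runs_py : Prop := ∀ (runs : List (String × Bool × Bool)), Dom_merge_bold_italic_runs_py runs → Spec_merge_bold_italic_runs_py runs (merge_bold_italic_runs_py runs)

-- ===== LEMMAS AND PROOFS =====

theorem pvCombine_nil_right (L : List (String × Bool × Bool)) : pvCombine L [] = L := by
  cases hL : L.getLast? <;> simp [pvCombine]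

theorem pvCombine_nil_left (R : List (String × Bool × Bool)) : pvCombine [] R = R := by
  cases R <;> simp [pvCombine]

-- A's step on a nonempty-text run is exactly B's boundary join with a singleton
theorem pvStep_eq_combine (acc : List (String × Bool × Bool)) (y : String × Bool × Bool)
    (hy : y.1 ≠ "") : pvMergeStepA acc y = pvCombine acc [y] := by
  obtain ⟨t, b, it⟩ := y
  cases hL : acc.getLast? <;> simp [pvMergeStepA, pvCombine, hL, hy]

-- associativity of the boundary join with a singleton in the middle
theorem pvCombine_assoc_single (acc : List (String × Bool × Bool)) (y : String × Bool × Bool)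
    (m : List (String × Bool × Bool)) :
    pvCombine (pvCombine acc [y]) m = pvCombine acc (pvCombine [y] m) := by
  obtain ⟨ty, fy⟩ := y
  cases m with
  | nil => simp [pvCombine_nil_right]
  | cons r rs =>
    obtain ⟨tr, fr⟩ := r
    rcases List.eq_nil_or_concat acc with hacc | ⟨as, l, hacc⟩
    · subst hacc; simp [pvCombine_nil_left]
    · subst hacc
      obtain ⟨tl, fl⟩ := l
      have hpair : ∀ (a b : Bool × Bool), (a.1 = b.1 ∧ a.2 = b.2) ↔ a = b := by
        intro a b; exact (Prod.ext_iff).symm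
      by_cases h1 : fl = fy <;> by_cases h2 : fy = fr
      · subst h1; subst h2
        simp [pvCombine, String.append_assoc]
      · subst h1
        simp [pvCombine, hpair, h2]
      · subst h2
        simp [pvCombine, hpair, h1, List.append_assoc]
      · by_cases h3 : fl = fr
        · subst h3; simp [pvCombine, hpair, h1, h2, List.append_assoc]
        · simp [pvCombine, hpair, h1, h2, List.append_assoc]

-- folding A's step from any accumulator over nonempty-text runs is a boundary join
theorem pvFoldl_eq_combine (ys : List (String × Bool × Bool)) (h : ∀ r ∈ ys, r.1 ≠ "") :
    ∀ acc, ys.foldl pvMergeStepA acc = pvCombine acc (ys.foldl pvMergeStepA []) := by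
  induction ys with
  | nil => intro acc; simp [pvCombine_nil_right]
  | cons y ys' ih =>
    intro acc
    have hy : y.1 ≠ "" := h y (List.mem_cons_self ..)
    have h' : ∀ r ∈ ys', r.1 ≠ "" := fun r hr => h r (List.mem_cons_of_mem _ hr)
    have hy0 : pvMergeStepA [] y = [y] := by
      rw [pvStep_eq_combine _ _ hy, pvCombine_nil_left]
    rw [List.foldl_cons, ih h', List.foldl_cons, hy0, ih h' [y],
      pvStep_eq_combine _ _ hy, pvCombine_assoc_single]

-- divide and conquer computes A's fold, on lists of nonempty-text runs
theorem pvDC_eq (rs : List (String × Bool × Bool)) (h : ∀ r ∈ rs, r.1 ≠ "") :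
    pvDC rs = rs.foldl pvMergeStepA [] := by
  induction hn : rs.length using Nat.strong_induction_on generalizing rs with
  | _ n ih =>
    rw [pvDC]
    by_cases hlen : rs.length ≤ 1
    · simp only [hlen, dif_pos]
      match rs, h with
      | [], _ => rfl
      | [r], h =>
        have hr : r.1 ≠ "" := h r (List.mem_cons_self ..)
        simp [pvMergeStepA, hr]
    · simp only [hlen, dif_neg, not_false_iff]
      have hmid1 : 1 ≤ rs.length / 2 := by omega
      have htake : (rs.take (rs.length / 2)).length < n := by
        simp only [List.length_take]; omega
      have hdrop : (rs.drop (rs.length / 2)).length < n := by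
        simp only [List.length_drop]; omega
      have hht : ∀ r ∈ rs.take (rs.length / 2), r.1 ≠ "" :=
        fun r hr => h r (List.mem_of_mem_take hr)
      have hhd : ∀ r ∈ rs.drop (rs.length / 2), r.1 ≠ "" :=
        fun r hr => h r (List.mem_of_mem_drop hr)
      rw [ih _ htake _ hht rfl, ih _ hdrop _ hhd rfl,
        ← pvFoldl_eq_combine _ hhd, ← List.foldl_append, List.take_append_drop]

-- A's step ignores empty-text runs, so A's fold equals its fold over the filtered list
theorem pvFoldl_filter (runs : List (String × Bool × Bool)) :
    ∀ acc, runs.foldl pvMergeStepA acc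
      = (runs.filter (fun r => !(r.1 == ""))).foldl pvMergeStepA acc := by
  induction runs with
  | nil => intro acc; rfl
  | cons r rest ih =>
    intro acc
    obtain ⟨t, b, it⟩ := r
    by_cases ht : t = ""
    · subst ht; simp [List.filter, pvMergeStepA, ih]
    · have hb : (t == "") = false := beq_eq_false_iff_ne.mpr ht
      simp [hb, ih]

-- ===== VERDICT (by name: the statement is the Claim_ definition above) =====
theorem merge_bold_italic_runs_py_spec : Claim_equal_merge_bold_italic_runs_py := by
  intro runs _
  unfold Spec_merge_bold_italic_runs_py merge_bold_italic_runs_py merge_bold_italic_runs_py_alt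
  rw [pvFoldl_filter runs []]
  have hne : ∀ r ∈ runs.filter (fun r => !(r.1 == "")), r.1 ≠ "" := by
    intro r hr
    simpa [beq_iff_eq] using List.of_mem_filter hr
  rw [pvDC_eq _ hne]
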